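-- pv_equiv track=rewrite | github.com/Sayat11002/Diplom2 | tco1_calculator.py | calc_transport_tax
-- ===== SOURCE A (Python) =====
-- MRP = 4_325
--
-- TAX_TABLE = [
--     (1100,          1),
--     (1500,          2),
--     (2000,          3),
--     (2500,          6),
--     (3000,          9),
--     (4000,         15),
--     (float("inf"), 117),
-- ]
--
-- def calc_transport_tax(volume_cc: int, fuel_type_en: str) -> int:
--     """Транспортный налог. fuel_type_en — нормализованное значение ('electric'/'электро'/'Электро')."""
--     if fuel_type_en.lower() in ("electric", "электро"):
--         return 0
--     base_mrp = 1
--     lower = 0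
--     for upper, mrp in TAX_TABLE:
--         if volume_cc <= upper:
--             base_mrp = mrp
--             break
--         lower = upper
--     tax = base_mrp * MRP
--     if volume_cc > 1500:
--         tax += (volume_cc - lower) * 7
--     return int(tax)
-- ===== SOURCE B (Python) =====
-- MRP = 4_325
--
-- _THRESHOLDS = [1100, 1500, 2000, 2500, 3000, 4000]
-- _MULTIPLIERS = [1, 2, 3, 6, 9, 15, 117]
--
-- def _bisect_left(a, x):
--     lo, hi = 0, len(a)
--     while lo < hi:
--         mid = (lo + hi) // 2
--         if a[mid] < x:
--             lo = mid + 1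
--         else:
--             hi = mid
--     return lo
--
-- def calc_transport_tax(volume_cc: int, fuel_type_en: str) -> int:
--     """Транспортный налог. fuel_type_en — нормализованное значение ('electric'/'электро'/'Электро')."""
--     if fuel_type_en.lower() in ("electric", "электро"):
--         return 0
--     i = _bisect_left(_THRESHOLDS, volume_cc)
--     lower = _THRESHOLDS[i - 1] if i > 0 else 0
--     tax = _MULTIPLIERS[i] * MRP
--     if volume_cc > 1500:
--         tax += (volume_cc - lower) * 7
--     return int(tax)
-- ===== Notes on version B (the rewrite author's own statement) =====
-- stated objective: alternative
-- what changed: Replaces A's linear scan over TAX_TABLE (with loop-carried lower bound) by a binary search (bisect_left) over a thresholds list with parallel multipliers, reading the lower bound and multiplier by index.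
import Mathlib
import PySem

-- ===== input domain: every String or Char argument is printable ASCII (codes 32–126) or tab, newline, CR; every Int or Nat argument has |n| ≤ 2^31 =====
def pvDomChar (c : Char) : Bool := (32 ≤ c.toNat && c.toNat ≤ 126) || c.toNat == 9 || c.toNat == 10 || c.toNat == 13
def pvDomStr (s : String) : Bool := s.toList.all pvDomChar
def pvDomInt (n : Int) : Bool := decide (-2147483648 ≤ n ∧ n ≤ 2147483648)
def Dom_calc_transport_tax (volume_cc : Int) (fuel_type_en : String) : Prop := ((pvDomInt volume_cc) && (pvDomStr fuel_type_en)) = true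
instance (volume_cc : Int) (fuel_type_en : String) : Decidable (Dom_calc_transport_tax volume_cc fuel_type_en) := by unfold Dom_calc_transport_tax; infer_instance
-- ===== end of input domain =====

-- B replaces A's linear table scan by a binary search over parallel threshold/multiplier lists (alternative decomposition, not claimed faster).
-- ===== PORT A =====
-- TAX_TABLE's last upper bound is float("inf"); it is used only in 'volume_cc <= upper', which is
-- always true there, so the table is ported with 'Option Int' uppers ('none' = inf, comparison true).
def pvTaxTableA : List (Option Int × Int) :=
  [(some 1100, 1), (some 1500, 2), (some 2000, 3), (some 2500, 6),
   (some 3000, 9), (some 4000, 15), (none, 117)]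

-- the for-loop with break, carrying (base_mrp, lower)
def pvTaxLoopA (volume_cc : Int) : List (Option Int × Int) → Int × Int → Int × Int
  | [], st => st
  | (upper, mrp) :: rest, (base, lower) =>
    match upper with
    | none => (mrp, lower)            -- volume_cc <= inf: break
    | some u =>
      if volume_cc ≤ u then (mrp, lower)
      else pvTaxLoopA volume_cc rest (base, u)

def calc_transport_tax (volume_cc : Int) (fuel_type_en : String) : Int :=
  if PySem.Str.lower fuel_type_en = "electric" ∨ PySem.Str.lower fuel_type_en = "электро" then 0
  else
    let st := pvTaxLoopA volume_cc pvTaxTableA (1, 0)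
    let tax := st.1 * 4325
    if volume_cc > 1500 then tax + (volume_cc - st.2) * 7 else tax

-- ===== PORT B =====
-- Source B's hand-written _bisect_left, transcribed (the while-loop as recursion on hi - lo)
-- the while-loop as structural recursion on a fuel counter (fuel hi-lo bounds the
-- iteration count, which only ever shrinks hi - lo; the guard lo < hi is the loop test)
def pvBisectLeft : Nat → List Int → Int → Nat → Nat → Nat
  | 0, _, _, lo, _ => lo
  | fuel + 1, a, x, lo, hi =>
    if lo < hi then
      let mid := (lo + hi) / 2
      if a.getD mid 0 < x then pvBisectLeft fuel a x (mid + 1) hi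
      else pvBisectLeft fuel a x lo mid
    else lo

def pvThresholds : List Int := [1100, 1500, 2000, 2500, 3000, 4000]
def pvMultipliers : List Int := [1, 2, 3, 6, 9, 15, 117]

def calc_transport_tax_alt (volume_cc : Int) (fuel_type_en : String) : Int :=
  if PySem.Str.lower fuel_type_en = "electric" ∨ PySem.Str.lower fuel_type_en = "электро" then 0
  else
    let i := pvBisectLeft pvThresholds.length pvThresholds volume_cc 0 pvThresholds.length
    let lower := if i > 0 then pvThresholds.getD (i - 1) 0 else 0
    let tax := pvMultipliers.getD i 0 * 4325
    if volume_cc > 1500 then tax + (volume_cc - lower) * 7 else tax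

-- ===== PRECONDITION & SPEC =====
def Spec_calc_transport_tax (volume_cc : Int) (fuel_type_en : String) (out : Int) : Prop := out = calc_transport_tax_alt volume_cc fuel_type_en
instance (volume_cc : Int) (fuel_type_en : String) (out : Int) : Decidable (Spec_calc_transport_tax volume_cc fuel_type_en out) := by unfold Spec_calc_transport_tax; infer_instance

-- ===== CLAIM (what is proved, stated in full; the proofs are below) =====
def Claim_equal_calc_transport_tax : Prop := ∀ (volume_cc : Int) (fuel_type_en : String), Dom_calc_transport_tax volume_cc fuel_type_en → Spec_calc_transport_tax volume_cc fuel_type_en (calc_transport_tax volume_cc fuel_type_en)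

-- ===== LEMMAS AND PROOFS =====

-- closed form of A's table loop on the literal table
theorem pvTaxLoopA_closed (x : Int) :
    pvTaxLoopA x pvTaxTableA (1, 0) =
      if x ≤ 1100 then (1, 0) else if x ≤ 1500 then (2, 1100)
      else if x ≤ 2000 then (3, 1500) else if x ≤ 2500 then (6, 2000)
      else if x ≤ 3000 then (9, 2500) else if x ≤ 4000 then (15, 3000)
      else (117, 4000) := by
  simp only [pvTaxTableA, pvTaxLoopA]

-- closed form of Source B's binary search on the literal thresholds list
theorem pvBisectLeft_closed (x : Int) :
    pvBisectLeft 6 pvThresholds x 0 6 =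
      if x ≤ 1100 then 0 else if x ≤ 1500 then 1 else if x ≤ 2000 then 2
      else if x ≤ 2500 then 3 else if x ≤ 3000 then 4 else if x ≤ 4000 then 5
      else 6 := by
  simp only [pvThresholds, pvBisectLeft, List.getD, List.getElem?_cons_succ,
    List.getElem?_cons_zero, Nat.reduceAdd, Nat.reduceDiv, Option.getD_some,
    Nat.reduceLT, if_true, if_false]
  split_ifs <;> first | rfl | omega

-- ===== VERDICT (by name: the statement is the Claim_ definition above) =====
theorem calc_transport_tax_spec : Claim_equal_calc_transport_tax := by
  intro volume_cc fuel_type_en _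
  unfold Spec_calc_transport_tax calc_transport_tax calc_transport_tax_alt
  by_cases h : PySem.Str.lower fuel_type_en = "electric" ∨ PySem.Str.lower fuel_type_en = "электро"
  · simp [h]
  · have hlen : pvThresholds.length = 6 := rfl
    simp only [h, if_false, pvTaxLoopA_closed, hlen, pvBisectLeft_closed]
    split_ifs <;>
      first
        | omega
        | (simp only [pvThresholds, pvMultipliers, List.getD, List.getElem?_cons_succ,
             List.getElem?_cons_zero, Option.getD_some]; try omega)
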